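-- pv_equiv track=rewrite | github.com/YEONGINJOO/algorithm | 백준/Silver/31780. 불사조/불사조.py | calculate_phoenix_power
-- ===== SOURCE A (Python) =====
-- def calculate_phoenix_power(x, m):
--     total_power = x
--     current_generation = [x]
--
--     for _ in range(m):
--         next_generation = []
--         for power in current_generation:
--             if power == 0:
--                 continue
--             a = power // 2
--             b = (power + 1) // 2
--             next_generation.append(a)
--             next_generation.append(b)
--
--         total_power += sum(next_generation)
--         current_generation = next_generation
--
--     return total_power
-- ===== SOURCE B (Python) =====
-- def calculate_phoenix_power(x, m):
--     # Each splitting generation preserves the total sum (p//2 + (p+1)//2 == p),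
--     # so the grand total is x repeated m+1 times (m < 0 gives no generations).
--     return x * (max(m, 0) + 1)
-- ===== Notes on version B (the rewrite author's own statement) =====
-- stated objective: faster
-- what changed: Replaced the exponential generation-by-generation simulation with the closed form x*(max(m,0)+1), justified by the invariant that each generation's sum equals x.
import Mathlib
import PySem

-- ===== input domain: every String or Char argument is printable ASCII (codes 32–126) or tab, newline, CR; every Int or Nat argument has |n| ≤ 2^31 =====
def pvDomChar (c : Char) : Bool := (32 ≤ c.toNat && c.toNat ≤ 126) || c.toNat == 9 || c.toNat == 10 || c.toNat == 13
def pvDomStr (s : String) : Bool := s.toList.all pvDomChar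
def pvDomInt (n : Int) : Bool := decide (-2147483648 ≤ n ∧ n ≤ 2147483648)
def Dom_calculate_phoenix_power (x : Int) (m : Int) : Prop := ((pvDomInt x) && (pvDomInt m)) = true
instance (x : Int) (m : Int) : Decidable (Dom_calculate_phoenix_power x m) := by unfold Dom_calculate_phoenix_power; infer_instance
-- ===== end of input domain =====

-- B replaces A's exponential generation simulation with the closed form x*(max(m,0)+1)
-- (each generation's total power equals x); objective: faster (asymptotic).

-- ===== PORT A =====
-- inner loop: build next_generation by appending p//2 and (p+1)//2 for each nonzero p
def pvNextGen (g : List Int) : List Int :=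
  g.foldl (fun acc p =>
    if p = 0 then acc
    else acc ++ [PySem.Int.floordiv p 2, PySem.Int.floordiv (p + 1) 2]) []

def calculate_phoenix_power (x : Int) (m : Int) : Int :=
  let st := (PySem.List.pyRange 0 m 1).foldl
    (fun (st : Int × List Int) _ =>
      let next := pvNextGen st.2
      (st.1 + next.sum, next))
    (x, [x])
  st.1

-- ===== PORT B =====
def calculate_phoenix_power_alt (x : Int) (m : Int) : Int :=
  x * (max m 0 + 1)

-- ===== PRECONDITION & SPEC =====
def Spec_calculate_phoenix_power (x : Int) (m : Int) (out : Int) : Prop := out = calculate_phoenix_power_alt x m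
instance (x : Int) (m : Int) (out : Int) : Decidable (Spec_calculate_phoenix_power x m out) := by unfold Spec_calculate_phoenix_power; infer_instance

-- ===== CLAIM (what is proved, stated in full; the proofs are below) =====
def Claim_equal_calculate_phoenix_power : Prop := ∀ (x : Int) (m : Int), Dom_calculate_phoenix_power x m → Spec_calculate_phoenix_power x m (calculate_phoenix_power x m)

-- ===== LEMMAS AND PROOFS =====

lemma pv_halves_sum (p : Int) :
    PySem.Int.floordiv p 2 + PySem.Int.floordiv (p + 1) 2 = p := by
  rw [PySem.Int.floordiv_eq_ediv_of_pos (by omega), PySem.Int.floordiv_eq_ediv_of_pos (by omega)]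
  omega

lemma pvNextGen_go_sum (g : List Int) (acc : List Int) :
    (g.foldl (fun acc p =>
      if p = 0 then acc
      else acc ++ [PySem.Int.floordiv p 2, PySem.Int.floordiv (p + 1) 2]) acc).sum
      = acc.sum + g.sum := by
  induction g generalizing acc with
  | nil => simp
  | cons p t ih =>
    by_cases hp : p = 0
    · rw [List.foldl_cons, if_pos hp, ih, List.sum_cons, hp]
      ring
    · rw [List.foldl_cons, if_neg hp, ih, List.sum_cons, List.sum_append]
      have h := pv_halves_sum p
      simp only [List.sum_cons, List.sum_nil]
      linarith

lemma pvNextGen_sum (g : List Int) : (pvNextGen g).sum = g.sum := by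
  rw [pvNextGen, pvNextGen_go_sum]
  simp

lemma pv_loop_invariant (x : Int) (l : List Int) (t : Int) (g : List Int) (hg : g.sum = x) :
    (l.foldl (fun (st : Int × List Int) _ =>
      let next := pvNextGen st.2
      (st.1 + next.sum, next)) (t, g)).1 = t + l.length * x ∧
    (l.foldl (fun (st : Int × List Int) _ =>
      let next := pvNextGen st.2
      (st.1 + next.sum, next)) (t, g)).2.sum = x := by
  induction l generalizing t g with
  | nil => simpa using hg
  | cons a l ih =>
    simp only [List.foldl_cons, List.length_cons]
    have h1 : (pvNextGen g).sum = x := by rw [pvNextGen_sum, hg]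
    have := ih (t + (pvNextGen g).sum) (pvNextGen g) h1
    refine ⟨?_, this.2⟩
    rw [this.1, h1]; push_cast; ring

-- ===== VERDICT (by name: the statement is the Claim_ definition above) =====
theorem calculate_phoenix_power_spec : Claim_equal_calculate_phoenix_power := by
  intro x m _
  show calculate_phoenix_power x m = calculate_phoenix_power_alt x m
  unfold calculate_phoenix_power calculate_phoenix_power_alt
  have h := pv_loop_invariant x (PySem.List.pyRange 0 m 1) x [x] (by simp)
  simp only [] at h ⊢
  rw [h.1, PySem.List.length_pyRange_one]
  have : ((m - 0).toNat : Int) = max m 0 := by omega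
  rw [this]; ring
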